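-- pv_equiv track=rewrite | github.com/MAFPOS/ali | marocpos/models/product_attribute.py | generate_variant_combinations
-- ===== SOURCE A (Python) =====
-- def generate_variant_combinations(attributes_values):
--     """
--     Generate all possible combinations of attribute values
--
--     Args:
--         attributes_values: A dict where keys are attribute names and values are lists of values
--             e.g. {'Color': ['Red', 'Blue'], 'Size': ['S', 'M', 'L']}
--
--     Returns:
--         A list of dictionaries, each representing a variant combination
--     """
--     def generate_combinations(attrs, current=None, index=0):
--         if current is None:
--             current = {}
--
--         if index >= len(attrs):
--             return [current.copy()]
--
--         attr_name = list(attrs.keys())[index]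
--         combinations = []
--
--         for value in attrs[attr_name]:
--             current[attr_name] = value
--             combinations.extend(generate_combinations(attrs, current, index + 1))
--
--         return combinations
--
--     return generate_combinations(attributes_values)
-- ===== SOURCE B (Python) =====
-- def generate_variant_combinations(attributes_values):
--     result = [{}]
--     for attr, values in attributes_values.items():
--         result = [{**combo, attr: value} for combo in result for value in values]
--     return result
-- ===== Notes on version B (the rewrite author's own statement) =====
-- stated objective: simpler
-- what changed: Replaces the index-driven recursive helper with a mutable shared dict by a flat iterative frontier expansion: start from a single empty partial combination and, per attribute in insertion order, rebuild the list with one comprehension (combo outer, value inner); Pre_ only requires distinct attribute names, which every Python dict input has.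
import Mathlib
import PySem

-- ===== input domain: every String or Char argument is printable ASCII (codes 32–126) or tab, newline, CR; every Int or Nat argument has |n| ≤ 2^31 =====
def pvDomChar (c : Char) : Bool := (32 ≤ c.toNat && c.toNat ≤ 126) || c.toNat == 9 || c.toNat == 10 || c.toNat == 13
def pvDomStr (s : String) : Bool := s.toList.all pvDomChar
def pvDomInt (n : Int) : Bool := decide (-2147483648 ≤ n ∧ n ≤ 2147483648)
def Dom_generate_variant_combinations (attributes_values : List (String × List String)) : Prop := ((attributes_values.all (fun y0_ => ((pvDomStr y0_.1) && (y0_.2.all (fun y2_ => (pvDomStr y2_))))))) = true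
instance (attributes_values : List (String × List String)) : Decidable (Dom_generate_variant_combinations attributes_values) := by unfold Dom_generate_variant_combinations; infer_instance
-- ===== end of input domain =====

-- B replaces A's index-driven recursive helper (shared mutable dict) by an iterative frontier
-- expansion over the attribute list; same cost, flatter decomposition.


-- ===== PORT A =====
-- inner helper generate_combinations(attrs, current, index); 'combinations.extend(...)' in a
-- for-loop is the foldl with ++; 'current[attr_name] = value' is Dict.insert;
-- 'list(attrs.keys())[index]' reads the key list, 'attrs[attr_name]' is first-match dict lookup.
def pyGenCombs (attrs : List (String × List String)) (current : PySem.Dict String String)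
    (index : Nat) : List (List (String × String)) :=
  if _h : attrs.length ≤ index then [current.items]
  else
    let attr_name := (attrs.map Prod.fst).getD index ""
    let values := (attrs.lookup attr_name).getD []
    values.foldl (fun combos v => combos ++ pyGenCombs attrs (current.insert attr_name v) (index + 1)) []
termination_by attrs.length - index
decreasing_by omega

def generate_variant_combinations (attributes_values : List (String × List String)) : List (List (String × String)) :=
  pyGenCombs attributes_values PySem.Dict.empty 0

-- ===== PORT B =====
-- frontier expansion: result = [{}]; per attribute rebuild result (combo outer, value inner);
-- '{**combo, attr: value}' is exact as append here because attribute names are distinct (Pre_).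
def generate_variant_combinations_alt (attributes_values : List (String × List String)) : List (List (String × String)) :=
  attributes_values.foldl
    (fun result p => result.flatMap (fun combo => p.2.map (fun v => combo ++ [(p.1, v)])))
    [[]]

-- ===== PRECONDITION & SPEC =====
-- The assoc list models a Python dict, which cannot contain duplicate keys; Pre_ excludes
-- duplicate-key lists, which correspond to no actual Python input of A.
def Pre_generate_variant_combinations (attributes_values : List (String × List String)) : Prop :=
  (attributes_values.map Prod.fst).Nodup
instance (attributes_values : List (String × List String)) : Decidable (Pre_generate_variant_combinations attributes_values) := by unfold Pre_generate_variant_combinations; infer_instance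

def pvWitness_generate_variant_combinations : (List (String × List String)) :=
  [("Color", ["Red", "Blue"]), ("Size", ["S", "M", "L"])]

def Spec_generate_variant_combinations (attributes_values : List (String × List String)) (out : List (List (String × String))) : Prop := out = generate_variant_combinations_alt attributes_values
instance (attributes_values : List (String × List String)) (out : List (List (String × String))) : Decidable (Spec_generate_variant_combinations attributes_values out) := by unfold Spec_generate_variant_combinations; infer_instance

-- ===== CLAIM (what is proved, stated in full; the proofs are below) =====
def Claim_equal_generate_variant_combinations : Prop := ∀ (attributes_values : List (String × List String)), Dom_generate_variant_combinations attributes_values → Pre_generate_variant_combinations attributes_values → Spec_generate_variant_combinations attributes_values (generate_variant_combinations attributes_values)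

-- ===== LEMMAS AND PROOFS =====

-- B's loop body, named for the proofs
def pvStep (result : List (List (String × String))) (p : String × List String) : List (List (String × String)) :=
  result.flatMap (fun combo => p.2.map (fun v => combo ++ [(p.1, v)]))

lemma alt_eq_foldl (avs : List (String × List String)) :
    generate_variant_combinations_alt avs = avs.foldl pvStep [[]] := rfl

lemma foldl_pvStep_nil (l : List (String × List String)) : l.foldl pvStep [] = [] := by
  induction l with
  | nil => rfl
  | cons p l ih => simpa [pvStep] using ih

lemma foldl_pvStep_append (l : List (String × List String)) :
    ∀ s t : List (List (String × String)),
      l.foldl pvStep (s ++ t) = l.foldl pvStep s ++ l.foldl pvStep t := by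
  induction l with
  | nil => intro s t; simp
  | cons p l ih =>
      intro s t
      simp only [List.foldl_cons]
      rw [show pvStep (s ++ t) p = pvStep s p ++ pvStep t p by simp [pvStep]]
      exact ih _ _

lemma foldl_pvStep_seed (l : List (String × List String)) (s : List (List (String × String))) :
    l.foldl pvStep s = s.flatMap (fun c => l.foldl pvStep [c]) := by
  induction s with
  | nil => simp [foldl_pvStep_nil]
  | cons c s ih =>
      rw [show (c :: s) = [c] ++ s from rfl, foldl_pvStep_append, ih]
      simp

lemma lookup_getElem (l : List (String × List String)) (hnd : (l.map Prod.fst).Nodup)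
    (i : Nat) (h : i < l.length) : l.lookup l[i].1 = some l[i].2 := by
  induction l generalizing i with
  | nil => simp at h
  | cons a t ih =>
      have hnd' : a.1 ∉ t.map Prod.fst ∧ (t.map Prod.fst).Nodup := by
        rw [List.map_cons, List.nodup_cons] at hnd; exact hnd
      cases i with
      | zero => simp [List.lookup]
      | succ j =>
          have hj : j < t.length := by simpa using h
          have hmem : t[j].1 ∈ t.map Prod.fst := List.mem_map.mpr ⟨t[j], List.getElem_mem hj, rfl⟩
          have hbe : (t[j].1 == a.1) = false :=
            beq_eq_false_iff_ne.mpr (fun he => hnd'.1 (he ▸ hmem))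
          simp only [List.getElem_cons_succ, List.lookup, hbe]
          exact ih hnd'.2 j hj

lemma pyGenCombs_eq (attrs : List (String × List String)) (hnd : (attrs.map Prod.fst).Nodup)
    (index : Nat) (current : PySem.Dict String String)
    (hinv : ∀ k ∈ current.keys, k ∉ (attrs.map Prod.fst).drop index) :
    pyGenCombs attrs current index = (attrs.drop index).foldl pvStep [current.items] := by
  rw [pyGenCombs]
  by_cases h : attrs.length ≤ index
  · simp [h, List.drop_eq_nil_of_le h]
  · have hlt : index < attrs.length := by omega
    have hdropk : (attrs.map Prod.fst).drop index = attrs[index].1 :: (attrs.map Prod.fst).drop (index + 1) := by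
      rw [List.drop_eq_getElem_cons (by simpa using hlt)]
      simp
    have hname : (attrs.map Prod.fst).getD index "" = attrs[index].1 := by
      rw [List.getD_eq_getElem _ _ (by simpa using hlt)]
      simp
    have hfresh : current.contains attrs[index].1 = false := by
      rw [Bool.eq_false_iff]
      intro hc
      rw [PySem.Dict.contains_iff_mem_keys] at hc
      exact hinv _ hc (by rw [hdropk]; exact List.mem_cons_self ..)
    simp only [h, hname, lookup_getElem attrs hnd index hlt, Option.getD_some]
    rw [PySem.List.foldl_append_eq_flatMap]
    have hrec : ∀ v, pyGenCombs attrs (current.insert attrs[index].1 v) (index + 1)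
        = (attrs.drop (index + 1)).foldl pvStep [current.items ++ [(attrs[index].1, v)]] := by
      intro v
      rw [pyGenCombs_eq attrs hnd (index + 1) (current.insert attrs[index].1 v)]
      · simp [PySem.Dict.items_insert, hfresh]
      · intro k hk
        rw [PySem.Dict.mem_keys_insert] at hk
        have hnodrop : (attrs[index].1) ∉ (attrs.map Prod.fst).drop (index + 1) := by
          have := List.Nodup.sublist (List.drop_sublist index _) hnd
          rw [hdropk] at this
          exact (List.nodup_cons.mp this).1
        rcases hk with rfl | hk
        · exact hnodrop
        · have := hinv k hk
          rw [hdropk] at this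
          exact fun hc => this (List.mem_cons_of_mem _ hc)
    simp only [hrec]
    rw [List.drop_eq_getElem_cons hlt, List.foldl_cons]
    have hstep : pvStep [current.items] attrs[index] =
        attrs[index].2.map (fun v => current.items ++ [(attrs[index].1, v)]) := by
      simp [pvStep]
    rw [hstep, foldl_pvStep_seed, List.flatMap_map]
    simp
termination_by attrs.length - index
decreasing_by omega

-- ===== VERDICT (by name: the statement is the Claim_ definition above) =====
theorem generate_variant_combinations_spec : Claim_equal_generate_variant_combinations := by
  intro avs _hdom hpre
  unfold Spec_generate_variant_combinations
  rw [alt_eq_foldl, generate_variant_combinations,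
     pyGenCombs_eq avs hpre 0 PySem.Dict.empty (by simp)]
  simp [PySem.Dict.empty]
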